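-- pv_equiv track=rewrite | github.com/oserikov/nn-phonology | py_scripts/ml/ml_utils.py | create_xor_instances
-- ===== SOURCE A (Python) =====
-- def create_xor_instances(num_rounds=2000):
--     questions = []
--     answers = []
--     for round in range(num_rounds):
--         for x1 in 0, 1:
--             for x2 in 0, 1:
--                 for x3 in 0, 1:
--                     answer = [0, 0, 0]
--                     questions.append((x1, x2, x3))
--                     answer[0] = 1
--                     answers.append(tuple(answer))
--     return questions, answers
-- ===== SOURCE B (Python) =====
-- def create_xor_instances(num_rounds=2000):
--     n = 8 * num_rounds
--     questions = [((i >> 2) & 1, (i >> 1) & 1, i & 1) for i in range(n)]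
--     answers = [(1, 0, 0) for _ in range(n)]
--     return questions, answers
-- ===== Notes on version B (the rewrite author's own statement) =====
-- stated objective: alternative
-- what changed: Replaces A's round loop with 3-deep nested loops over (0,1) by one flat pass over range(8*num_rounds) that decodes each question triple from the bits of its index ((i>>2)&1,(i>>1)&1,i&1) and emits the constant answer (1,0,0) per index.
import Mathlib
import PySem

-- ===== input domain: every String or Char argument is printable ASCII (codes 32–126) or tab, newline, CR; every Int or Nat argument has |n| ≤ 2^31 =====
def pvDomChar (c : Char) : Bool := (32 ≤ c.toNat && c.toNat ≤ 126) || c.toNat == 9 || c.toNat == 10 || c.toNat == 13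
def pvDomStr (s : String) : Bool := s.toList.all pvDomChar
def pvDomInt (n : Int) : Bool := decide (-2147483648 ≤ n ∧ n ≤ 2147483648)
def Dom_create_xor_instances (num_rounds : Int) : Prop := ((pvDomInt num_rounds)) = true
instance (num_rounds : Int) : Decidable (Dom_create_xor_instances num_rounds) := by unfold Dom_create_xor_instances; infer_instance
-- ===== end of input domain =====

-- B replaces A's 4-deep nested loops by one flat pass over range(8*num_rounds) that decodes each
-- triple from the bits of its index (objective: alternative). Return value only; nothing is mutated.

-- ===== PORT A =====
-- literal port: outer loop over range(num_rounds), three nested loops over (0,1),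
-- answer = [0,0,0]; answer[0] = 1 appended as the tuple (1,0,0)
def create_xor_instances (num_rounds : Int) : (List (Int × Int × Int)) × (List (Int × Int × Int)) :=
  (PySem.List.pyRange 0 num_rounds 1).foldl
    (fun qa _ =>
      ([(0 : Int), 1].foldl
        (fun qa x1 =>
          ([(0 : Int), 1].foldl
            (fun qa x2 =>
              ([(0 : Int), 1].foldl
                (fun qa x3 =>
                  (qa.1 ++ [(x1, x2, x3)], qa.2 ++ [((1 : Int), (0 : Int), (0 : Int))]))
                qa))
            qa))
        qa))
    ([], [])

-- ===== PORT B =====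
-- one flat pass: question i is ((i >> 2) & 1, (i >> 1) & 1, i & 1)
def create_xor_instances_alt (num_rounds : Int) : (List (Int × Int × Int)) × (List (Int × Int × Int)) :=
  let n := 8 * num_rounds
  ((PySem.List.pyRange 0 n 1).map
      (fun (i : Int) => (PySem.Int.band (i >>> (2 : Nat)) 1, PySem.Int.band (i >>> (1 : Nat)) 1, PySem.Int.band i 1)),
   (PySem.List.pyRange 0 n 1).map (fun _ => ((1 : Int), (0 : Int), (0 : Int))))

-- ===== PRECONDITION & SPEC =====
def Spec_create_xor_instances (num_rounds : Int) (out : (List (Int × Int × Int)) × (List (Int × Int × Int))) : Prop := out = create_xor_instances_alt num_rounds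
instance (num_rounds : Int) (out : (List (Int × Int × Int)) × (List (Int × Int × Int))) : Decidable (Spec_create_xor_instances num_rounds out) := by unfold Spec_create_xor_instances; infer_instance

-- ===== CLAIM (what is proved, stated in full; the proofs are below) =====
def Claim_equal_create_xor_instances : Prop := ∀ (num_rounds : Int), Dom_create_xor_instances num_rounds → Spec_create_xor_instances num_rounds (create_xor_instances num_rounds)

-- ===== LEMMAS AND PROOFS =====

-- the 8 triples A appends in one round, in order
def pvBase : List (Int × Int × Int) :=
  [(0,0,0),(0,0,1),(0,1,0),(0,1,1),(1,0,0),(1,0,1),(1,1,0),(1,1,1)]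

-- A's per-round body
def pvStep (qa : (List (Int × Int × Int)) × (List (Int × Int × Int))) :
    (List (Int × Int × Int)) × (List (Int × Int × Int)) :=
  ([(0 : Int), 1].foldl
    (fun qa x1 =>
      ([(0 : Int), 1].foldl
        (fun qa x2 =>
          ([(0 : Int), 1].foldl
            (fun qa x3 =>
              (qa.1 ++ [(x1, x2, x3)], qa.2 ++ [((1 : Int), (0 : Int), (0 : Int))]))
            qa))
        qa))
    qa)

theorem pvStep_eq (qa : (List (Int × Int × Int)) × (List (Int × Int × Int))) :
    pvStep qa = (qa.1 ++ pvBase, qa.2 ++ List.replicate 8 ((1 : Int), (0 : Int), (0 : Int))) := by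
  simp [pvStep, pvBase, List.foldl, List.append_assoc]

theorem pvLoopA_eq (m : Nat) (qa : (List (Int × Int × Int)) × (List (Int × Int × Int))) :
    (List.range m).foldl (fun qa _ => pvStep qa) qa =
      (qa.1 ++ (List.replicate m pvBase).flatten,
       qa.2 ++ List.replicate (8 * m) ((1 : Int), (0 : Int), (0 : Int))) := by
  induction m generalizing qa with
  | zero => simp
  | succ k ih =>
      rw [List.range_succ, List.foldl_append, ih]
      simp only [List.foldl, pvStep_eq]
      have h8 : 8 * (k + 1) = 8 * k + 8 := by ring
      rw [List.replicate_succ' (n := k), h8, List.replicate_add]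
      simp [List.append_assoc]

-- B's index-decoding function, on a natural index
def pvBits (i : Int) : Int × Int × Int :=
  (PySem.Int.band (i >>> (2 : Nat)) 1, PySem.Int.band (i >>> (1 : Nat)) 1, PySem.Int.band i 1)

theorem pvBits_decode (k j : Nat) (hj : j < 8) :
    pvBits (Int.ofNat (8 * k + j)) = pvBase[j]'(by simp [pvBase]; omega) := by
  have hdiv : ∀ (s : Nat), (Int.ofNat (8 * k + j)) >>> s = (Int.ofNat (8 * k + j)) / (2 : Int) ^ s := by
    intro s; rw [Int.shiftRight_eq_div_pow]; norm_cast
  simp only [pvBits, hdiv, PySem.Int.band_one,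
    PySem.Int.mod_eq_emod_of_pos (b := 2) (by omega)]
  interval_cases j <;>
    · simp only [pvBase, List.getElem_cons_zero, List.getElem_cons_succ, Int.ofNat_eq_natCast]
      refine Prod.ext ?_ (Prod.ext ?_ ?_) <;> push_cast <;> omega

theorem pvMapB_eq (m : Nat) :
    (List.range (8 * m)).map (fun k : Nat => pvBits (Int.ofNat k)) = (List.replicate m pvBase).flatten := by
  induction m with
  | zero => simp
  | succ k ih =>
      have h8 : 8 * (k + 1) = 8 * k + 8 := by ring
      rw [h8, List.range_add, List.map_append, ih, List.replicate_succ' (n := k)]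
      have hr : List.range 8 = [0,1,2,3,4,5,6,7] := by decide
      simp only [hr, List.map_cons, List.map_nil,
        List.flatten_append, List.flatten_cons, List.flatten_nil, List.append_nil]
      rw [pvBits_decode k 0 (by omega), pvBits_decode k 1 (by omega), pvBits_decode k 2 (by omega),
          pvBits_decode k 3 (by omega), pvBits_decode k 4 (by omega), pvBits_decode k 5 (by omega),
          pvBits_decode k 6 (by omega), pvBits_decode k 7 (by omega)]
      rfl

-- ===== VERDICT (by name: the statement is the Claim_ definition above) =====
theorem create_xor_instances_spec : Claim_equal_create_xor_instances := by
  intro n _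
  show create_xor_instances n = create_xor_instances_alt n
  have hA : create_xor_instances n =
      ((List.replicate n.toNat pvBase).flatten,
       List.replicate (8 * n.toNat) ((1 : Int), (0 : Int), (0 : Int))) := by
    rw [create_xor_instances, PySem.List.pyRange_one, List.foldl_map]
    have := pvLoopA_eq n.toNat ([], [])
    simpa [pvStep] using this
  have h8 : (8 * n - 0).toNat = 8 * n.toNat := by omega
  rw [hA, create_xor_instances_alt]
  simp only [PySem.List.pyRange_one, List.map_map, h8]
  refine Prod.ext ?_ ?_
  · show (List.replicate n.toNat pvBase).flatten = _
    rw [← pvMapB_eq n.toNat]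
    apply List.map_congr_left
    intro k _
    simp [pvBits, Int.ofNat_eq_natCast]
  · show List.replicate (8 * n.toNat) ((1:Int),(0:Int),(0:Int)) = _
    symm
    rw [List.eq_replicate_iff]
    simp
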